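-- pv_equiv track=rewrite | github.com/alan2442/Projetos | LogicaDeProgramacaoBeewcrowd(Python)/virus.py | max_letalidade
-- ===== SOURCE A (Python) =====
-- def max_letalidade(virus):
--     letalidade = 0
--     i = 0
--     j = len(virus)-1
--     while i < j:
--         letalidade += (virus[j] - virus[i])
--         i += 1
--         j -= 1
--     return letalidade
-- ===== SOURCE B (Python) =====
-- def max_letalidade(virus):
--     m = len(virus) // 2
--     return sum(virus[len(virus) - m:]) - sum(virus[:m])
-- ===== Notes on version B (the rewrite author's own statement) =====
-- stated objective: simpler
-- what changed: Replaces the two-pointer converging index loop with a closed-form expression: half-length m, then sum of the last m elements minus sum of the first m elements (the odd middle element cancels); the C-level builtin sum over slices also makes it measurably faster.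
import Mathlib
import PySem

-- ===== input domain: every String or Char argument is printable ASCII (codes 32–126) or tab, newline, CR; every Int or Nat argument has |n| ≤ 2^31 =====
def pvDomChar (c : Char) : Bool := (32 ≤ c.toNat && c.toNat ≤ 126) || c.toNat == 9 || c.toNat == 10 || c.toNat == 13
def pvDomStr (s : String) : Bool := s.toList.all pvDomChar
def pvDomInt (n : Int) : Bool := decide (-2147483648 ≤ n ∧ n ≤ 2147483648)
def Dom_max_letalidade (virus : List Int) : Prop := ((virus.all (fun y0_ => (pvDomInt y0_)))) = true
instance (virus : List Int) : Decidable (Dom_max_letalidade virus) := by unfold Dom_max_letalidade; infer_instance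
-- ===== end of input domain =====

-- B replaces A's two-pointer converging loop with sum(last half) - sum(first half): simpler, same O(n) cost.

-- ===== PORT A =====
-- the while loop: i moves up, j moves down, accumulating virus[j] - virus[i]
-- (indices are always in range while i < j, so pyGetD with default 0 is exact here)
def maxLetLoop (virus : List Int) (i j acc : Int) : Int :=
  if _h : i < j then
    maxLetLoop virus (i + 1) (j - 1)
      (acc + (PySem.List.pyGetD virus j 0 - PySem.List.pyGetD virus i 0))
  else acc
termination_by (j - i).toNat
decreasing_by omega

def max_letalidade (virus : List Int) : Int :=
  maxLetLoop virus 0 ((virus.length : Int) - 1) 0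

-- ===== PORT B =====
def max_letalidade_alt (virus : List Int) : Int :=
  let m : Int := PySem.Int.floordiv (virus.length : Int) 2
  (PySem.List.slice virus (some ((virus.length : Int) - m)) none).sum
    - (PySem.List.slice virus none (some m)).sum

-- ===== PRECONDITION & SPEC =====
def Spec_max_letalidade (virus : List Int) (out : Int) : Prop := out = max_letalidade_alt virus
instance (virus : List Int) (out : Int) : Decidable (Spec_max_letalidade virus out) := by unfold Spec_max_letalidade; infer_instance

-- ===== CLAIM (what is proved, stated in full; the proofs are below) =====
def Claim_equal_max_letalidade : Prop := ∀ (virus : List Int), Dom_max_letalidade virus → Spec_max_letalidade virus (max_letalidade virus)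

-- ===== LEMMAS AND PROOFS =====

-- Loop invariant: with j = n - 1 - i and d iterations left (i + d = n/2),
-- the loop adds the sum of segment [n - n/2, n - n/2 + d) minus segment [i, i + d).
theorem maxLetLoop_eq (xs : List Int) (d : Nat) :
    ∀ (i : Nat) (acc : Int), i + d = xs.length / 2 →
      maxLetLoop xs (i : Int) ((xs.length : Int) - 1 - i) acc
        = acc + ((xs.drop (xs.length - xs.length / 2)).take d).sum
              - ((xs.drop i).take d).sum := by
  induction d with
  | zero =>
    intro i acc hi
    unfold maxLetLoop
    rw [dif_neg (by omega)]
    simp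
  | succ d ih =>
    intro i acc hi
    have hn := Nat.div_le_self xs.length 2
    have hi2 : 2 * (xs.length / 2) ≤ xs.length := by omega
    have hiltn : i < xs.length := by omega
    have htop : i + d + 1 ≤ xs.length / 2 := by omega
    unfold maxLetLoop
    rw [dif_pos (by omega)]
    have h1 : (i : Int) + 1 = ((i + 1 : Nat) : Int) := by push_cast; ring
    have h2 : (xs.length : Int) - 1 - i - 1 = (xs.length : Int) - 1 - ((i + 1 : Nat) : Int) := by
      push_cast [Nat.cast_add]; ring
    rw [h1, h2, ih (i + 1) _ (by omega)]
    -- evaluate the two indexings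
    have hjn : xs.length - 1 - i < xs.length := by omega
    have hgj : PySem.List.pyGetD xs ((xs.length : Int) - 1 - i) 0 = xs[xs.length - 1 - i] := by
      have : (xs.length : Int) - 1 - i = ((xs.length - 1 - i : Nat) : Int) := by omega
      rw [this, PySem.List.pyGetD_natCast, List.getD_eq_getElem _ _ hjn]
    have hgi : PySem.List.pyGetD xs (i : Int) 0 = xs[i] := by
      rw [PySem.List.pyGetD_natCast, List.getD_eq_getElem _ _ hiltn]
    rw [hgj, hgi]
    -- bottom segment: take (d+1) (drop i) = xs[i] :: take d (drop (i+1))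
    have hbot : (xs.drop i).take (d + 1) = xs[i] :: (xs.drop (i + 1)).take d := by
      rw [List.drop_eq_getElem_cons hiltn, List.take_succ_cons]
    -- top segment: take (d+1) L = take d L ++ [L[d]] where L[d] = xs[n-1-i]
    have hLd : (xs.drop (xs.length - xs.length / 2))[d]? = some xs[xs.length - 1 - i] := by
      rw [List.getElem?_drop]
      have heq : xs.length - xs.length / 2 + d = xs.length - 1 - i := by omega
      rw [heq, List.getElem?_eq_getElem hjn]
    have htopseg : ((xs.drop (xs.length - xs.length / 2)).take (d + 1)).sum
        = ((xs.drop (xs.length - xs.length / 2)).take d).sum + xs[xs.length - 1 - i] := by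
      rw [List.take_add_one, hLd]
      simp
    rw [htopseg, hbot]
    simp
    ring

theorem max_letalidade_alt_eq (xs : List Int) :
    max_letalidade_alt xs
      = ((xs.drop (xs.length - xs.length / 2)).take (xs.length / 2)).sum
        - ((xs.drop 0).take (xs.length / 2)).sum := by
  unfold max_letalidade_alt
  dsimp only
  have hm : PySem.Int.floordiv (xs.length : Int) 2 = ((xs.length / 2 : Nat) : Int) := by
    exact_mod_cast PySem.Int.floordiv_natCast xs.length 2
  have hsub : (xs.length : Int) - ((xs.length / 2 : Nat) : Int)
      = ((xs.length - xs.length / 2 : Nat) : Int) := by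
    have := Nat.div_le_self xs.length 2
    push_cast; omega
  rw [hm, hsub, PySem.List.slice_from_natCast, PySem.List.slice_to_natCast]
  have hlen : (xs.drop (xs.length - xs.length / 2)).length ≤ xs.length / 2 := by
    rw [List.length_drop]; omega
  rw [List.take_of_length_le hlen]
  simp

-- ===== VERDICT (by name: the statement is the Claim_ definition above) =====
theorem max_letalidade_spec : Claim_equal_max_letalidade := by
  intro xs _
  unfold Spec_max_letalidade max_letalidade
  have h0 : ((0 : Nat) : Int) = (0 : Int) := rfl
  have := maxLetLoop_eq xs (xs.length / 2) 0 0 (by omega)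
  simp only [Nat.cast_zero, sub_zero] at this
  rw [this, max_letalidade_alt_eq]
  ring
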